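-- pv_equiv track=rewrite | github.com/posl/comment_recommendation | script/split_gen/5_time/en/286_C/8.py | palindrome_cost
-- ===== SOURCE A (Python) =====
-- def palindrome_cost(n, a, b, s):
--     is_palindrome = True
--     cost = 0
--     for i in range(n // 2):
--         if s[i] != s[n - i - 1]:
--             is_palindrome = False
--             break
--     if is_palindrome:
--         return 0
--     for i in range(n // 2):
--         if s[i] != s[n - i - 1]:
--             if s[i] == 'a' or s[n - i - 1] == 'a':
--                 cost += a
--             else:
--                 cost += b
--     return cost
-- ===== SOURCE B (Python) =====
-- def palindrome_cost(n, a, b, s):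
--     if n < 2:
--         return 0
--     fwd = list(s[:n])   # pop() yields the rightmost unprocessed character
--     bwd = fwd[::-1]     # pop() yields the leftmost unprocessed character
--     cost = 0
--     while 2 * len(fwd) > n:   # more than half of the characters still unprocessed
--         last = fwd.pop()
--         first = bwd.pop()
--         if first != last:
--             cost += a if first == 'a' or last == 'a' else b
--     return cost
-- ===== Notes on version B (the rewrite author's own statement) =====
-- stated objective: alternative
-- what changed: Replaces A's two index-based passes over range(n//2) (a flagged palindrome pre-check with break, then a re-scan accumulating cost) by an iterative two-stack peel: a forward and a reversed copy of s[:n] are popped in lockstep until the midpoint, adding each popped pair's repair cost on mismatch; no index arithmetic, no flag, no second pass.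
import Mathlib
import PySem

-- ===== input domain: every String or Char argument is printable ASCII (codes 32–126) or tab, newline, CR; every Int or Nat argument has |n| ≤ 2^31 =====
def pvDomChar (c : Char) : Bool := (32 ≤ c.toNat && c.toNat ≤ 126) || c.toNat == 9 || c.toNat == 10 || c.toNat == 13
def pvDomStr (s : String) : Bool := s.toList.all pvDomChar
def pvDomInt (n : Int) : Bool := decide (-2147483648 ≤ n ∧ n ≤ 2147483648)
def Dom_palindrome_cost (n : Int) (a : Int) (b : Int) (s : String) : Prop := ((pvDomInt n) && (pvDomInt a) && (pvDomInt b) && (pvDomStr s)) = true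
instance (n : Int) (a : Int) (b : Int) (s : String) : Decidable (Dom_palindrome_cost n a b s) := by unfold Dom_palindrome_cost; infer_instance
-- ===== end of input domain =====

-- B replaces A's two index-based passes (flagged palindrome pre-check, then a cost re-scan)
-- by an iterative two-stack peel: a forward and a reversed copy of s[:n] are popped in
-- lockstep until the midpoint, accumulating each pair's repair cost; alternative decomposition (not faster).


-- ===== PORT A =====
-- first loop: 'for i in range(n//2): if s[i] != s[n-i-1]: is_palindrome = False; break'
def pvACheck (cs : List Char) (n : Int) : List Int → Bool
  | [] => true
  | i :: rest =>
    if PySem.List.pyGet? cs i != PySem.List.pyGet? cs (n - i - 1) then false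
    else pvACheck cs n rest

def palindrome_cost (n : Int) (a : Int) (b : Int) (s : String) : Int :=
  if pvACheck s.toList n (PySem.List.pyRange 0 (PySem.Int.floordiv n 2) 1) then 0
  else
    -- second loop with the running 'cost' accumulator
    (PySem.List.pyRange 0 (PySem.Int.floordiv n 2) 1).foldl (fun cost i =>
      if PySem.List.pyGet? s.toList i != PySem.List.pyGet? s.toList (n - i - 1) then
        if PySem.List.pyGet? s.toList i == some 'a' || PySem.List.pyGet? s.toList (n - i - 1) == some 'a'
        then cost + a else cost + b
      else cost) 0

-- ===== PORT B =====
-- 'while 2*len(fwd) > n: last = fwd.pop(); first = bwd.pop(); if first != last: cost += …'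
def pvPeel (n a b : Int) (fwd bwd : List Char) (cost : Int) : Int :=
  if 2 * ((fwd.length : Nat) : Int) > n then
    match fwd, bwd with
    | [], _ => cost        -- Python 'pop' would raise here; unreachable when the caller guards n < 2
    | _ :: _, [] => cost   -- likewise unreachable (both stacks always have equal length)
    | f1 :: fr, g1 :: gr =>
      let last := (f1 :: fr).getLast (by simp)
      let first := (g1 :: gr).getLast (by simp)
      pvPeel n a b (f1 :: fr).dropLast (g1 :: gr).dropLast
        (if first != last then cost + (if first == 'a' || last == 'a' then a else b) else cost)
  else cost
termination_by fwd.length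
decreasing_by simp

-- 'if n < 2: return 0'; fwd = list(s[:n]); bwd = fwd[::-1]  (s[::-1] is reverse, PySem.List.slice?_none_none_neg_one)
def palindrome_cost_alt (n : Int) (a : Int) (b : Int) (s : String) : Int :=
  if n < 2 then 0
  else
    pvPeel n a b (PySem.List.slice s.toList none (some n))
      (PySem.List.slice s.toList none (some n)).reverse 0

-- ===== PRECONDITION & SPEC =====
-- Pre_ excludes exactly the inputs where Python A raises IndexError
-- (the loop runs, i.e. n ≥ 2, and index n-1 is past the end of s).
def Pre_palindrome_cost (n : Int) (a : Int) (b : Int) (s : String) : Prop :=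
  n ≤ (s.toList.length : Int) ∨ n ≤ 1
instance (n : Int) (a : Int) (b : Int) (s : String) : Decidable (Pre_palindrome_cost n a b s) := by
  unfold Pre_palindrome_cost; infer_instance
def pvWitness_palindrome_cost : Int × Int × Int × String := (4, 2, 3, "abca")

def Spec_palindrome_cost (n : Int) (a : Int) (b : Int) (s : String) (out : Int) : Prop := out = palindrome_cost_alt n a b s
instance (n : Int) (a : Int) (b : Int) (s : String) (out : Int) : Decidable (Spec_palindrome_cost n a b s out) := by unfold Spec_palindrome_cost; infer_instance

-- ===== CLAIM (what is proved, stated in full; the proofs are below) =====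
def Claim_equal_palindrome_cost : Prop := ∀ (n : Int) (a : Int) (b : Int) (s : String), Dom_palindrome_cost n a b s → Pre_palindrome_cost n a b s → Spec_palindrome_cost n a b s (palindrome_cost n a b s)

-- ===== LEMMAS AND PROOFS =====

-- the per-pair cost of position k in t, paired with position t.length-1-k
def pvPair (a b : Int) (t : List Char) (k : Nat) : Int :=
  if t[k]? != t[t.length - 1 - k]? then
    (if t[k]? == some 'a' || t[t.length - 1 - k]? == some 'a' then a else b)
  else 0

-- an accumulating fold is the initial value plus a sum
theorem pvFoldl_add_sum (g : Nat → Int) (l : List Nat) (i : Int) :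
    l.foldl (fun acc k => acc + g k) i = i + (l.map g).sum := by
  induction l generalizing i with
  | nil => simp
  | cons k t ih => simp only [List.foldl_cons, List.map_cons, List.sum_cons, ih]; ring

-- folds of pointwise-equal bodies agree
theorem pvFoldl_congr {α β : Type} (l : List α) (f g : β → α → β) (i : β)
    (h : ∀ acc x, x ∈ l → f acc x = g acc x) : l.foldl f i = l.foldl g i := by
  induction l generalizing i with
  | nil => rfl
  | cons x t ih =>
    rw [List.foldl_cons, List.foldl_cons, h i x (by simp)]
    exact ih _ (fun acc y hy => h acc y (by simp [hy]))

-- floor division by 2 of a nonneg Int is Nat division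
theorem pvFloordiv2 (n : Int) (h : 0 ≤ n) :
    PySem.Int.floordiv n 2 = ((n.toNat / 2 : Nat) : Int) := by
  simp [PySem.Int.floordiv, Int.fdiv_eq_ediv]
  omega

-- if the check loop reports a palindrome, A's second loop keeps its accumulator
theorem pvACheck_fold_id (cs : List Char) (n a b : Int) (l : List Int) (c : Int)
    (h : pvACheck cs n l = true) :
    l.foldl (fun cost i =>
      if PySem.List.pyGet? cs i != PySem.List.pyGet? cs (n - i - 1) then
        if PySem.List.pyGet? cs i == some 'a' || PySem.List.pyGet? cs (n - i - 1) == some 'a'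
        then cost + a else cost + b
      else cost) c = c := by
  induction l generalizing c with
  | nil => rfl
  | cons i t ih =>
    unfold pvACheck at h
    by_cases hm : (PySem.List.pyGet? cs i != PySem.List.pyGet? cs (n - i - 1)) = true
    · simp [hm] at h
    · simp only [List.foldl_cons]
      rw [if_neg hm]
      exact ih c (by simpa [hm] using h)

-- one iteration of the while loop, when both stacks are nonempty and the guard holds
theorem pvPeel_step (n a b : Int) (f1 : Char) (fr : List Char) (g1 : Char) (gr : List Char)
    (cost : Int) (hc : 2 * (((f1 :: fr).length : Nat) : Int) > n) :
    pvPeel n a b (f1 :: fr) (g1 :: gr) cost =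
      pvPeel n a b (f1 :: fr).dropLast (g1 :: gr).dropLast
        (if (g1 :: gr).getLast (by simp) != (f1 :: fr).getLast (by simp) then
           cost + (if (g1 :: gr).getLast (by simp) == 'a' || (f1 :: fr).getLast (by simp) == 'a'
                   then a else b)
         else cost) := by
  rw [pvPeel.eq_def, if_pos hc]

-- the peel, started on the first m characters of t (and of t.reverse), adds the per-pair
-- costs of the positions it processes: j = t.length-m, …, up to (but excluding) n.toNat/2 remaining
theorem pvPeel_eq_sum (n a b : Int) (h2 : 2 ≤ n) (t : List Char) (m : Nat) (hm : m ≤ t.length)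
    (cost : Int) :
    pvPeel n a b (t.take m) (t.reverse.take m) cost
      = cost + ((List.range' (t.length - m) (m - min m (n.toNat / 2))).map (pvPair a b t)).sum := by
  induction m generalizing cost with
  | zero =>
    rw [pvPeel.eq_def]
    have : ¬ (2 * (((List.take 0 t).length : Nat) : Int) > n) := by simp; omega
    rw [if_neg this]
    simp
  | succ m ih =>
    by_cases hc : 2 * (((m + 1 : Nat) : Nat) : Int) > n
    · -- the guard holds: one iteration, then the state is (take m, reverse.take m)
      have hmlen : (t.take (m + 1)).length = m + 1 := by
        rw [List.length_take]; omega
      obtain ⟨f1, fr, hf⟩ : ∃ f1 fr, t.take (m + 1) = f1 :: fr := by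
        cases h : t.take (m + 1) with
        | nil => rw [h] at hmlen; simp at hmlen
        | cons x xs => exact ⟨x, xs, rfl⟩
      have hrlen : (t.reverse.take (m + 1)).length = m + 1 := by
        rw [List.length_take, List.length_reverse]; omega
      obtain ⟨g1, gr, hg⟩ : ∃ g1 gr, t.reverse.take (m + 1) = g1 :: gr := by
        cases h : t.reverse.take (m + 1) with
        | nil => rw [h] at hrlen; simp at hrlen
        | cons x xs => exact ⟨x, xs, rfl⟩
      have hdropf : (f1 :: fr).dropLast = t.take m := by
        rw [← hf, List.dropLast_eq_take, hmlen, List.take_take]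
        simp
      have hdropg : (g1 :: gr).dropLast = t.reverse.take m := by
        rw [← hg, List.dropLast_eq_take, hrlen, List.take_take]
        simp
      have hlastf : (f1 :: fr).getLast (by simp) = t[m]'(by omega) := by
        rw [List.getLast_eq_getElem]
        simp only [← hf, hmlen]
        rw [List.getElem_take]
        simp only [Nat.add_sub_cancel]
      have hlastg : (g1 :: gr).getLast (by simp) = t[t.length - 1 - m]'(by omega) := by
        rw [List.getLast_eq_getElem]
        simp only [← hg, hrlen]
        rw [List.getElem_take, List.getElem_reverse]
        simp only [Nat.add_sub_cancel]
      have hc' : 2 * (((f1 :: fr).length : Nat) : Int) > n := by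
        have : (f1 :: fr).length = m + 1 := by rw [← hf]; exact hmlen
        rw [this]; exact_mod_cast hc
      rw [hf, hg, pvPeel_step n a b f1 fr g1 gr cost hc', hdropf, hdropg, ih (by omega)]
      -- identify the processed pair's contribution with pvPair at j = t.length - (m+1)
      have hj : t.length - 1 - m = t.length - (m + 1) := by omega
      have hcontrib :
          (if (g1 :: gr).getLast (by simp) != (f1 :: fr).getLast (by simp) then
             cost + (if (g1 :: gr).getLast (by simp) == 'a' || (f1 :: fr).getLast (by simp) == 'a'
                     then a else b)
           else cost) = cost + pvPair a b t (t.length - (m + 1)) := by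
        rw [hlastf, hlastg]
        unfold pvPair
        have e1 : t[t.length - (m + 1)]? = some (t[t.length - 1 - m]'(by omega)) := by
          rw [List.getElem?_eq_getElem (by omega)]
          simp [hj]
        have e2 : t[t.length - 1 - (t.length - (m + 1))]? = some (t[m]'(by omega)) := by
          rw [List.getElem?_eq_getElem (by omega)]
          have : t.length - 1 - (t.length - (m + 1)) = m := by omega
          simp [this]
        rw [e1, e2]
        simp only [show ∀ (x y : Char), (some x != some y) = (x != y) from fun _ _ => rfl,
          show ∀ (x y : Char), (some x == some y) = (x == y) from fun _ _ => rfl]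
        split_ifs <;> ring
      rw [hcontrib]
      -- fold the head position into the range
      have hmin1 : min (m + 1) (n.toNat / 2) = n.toNat / 2 := by omega
      have hmin2 : min m (n.toNat / 2) = n.toNat / 2 := by omega
      have hcount : m + 1 - n.toNat / 2 = (m - n.toNat / 2) + 1 := by omega
      rw [hmin1, hmin2, hcount, List.range'_succ, List.map_cons, List.sum_cons]
      have : t.length - m = t.length - (m + 1) + 1 := by omega
      rw [this]
      ring
    · -- the guard fails: the loop stops with the accumulated cost
      rw [pvPeel.eq_def]
      have hlen : (t.take (m + 1)).length = m + 1 := by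
        rw [List.length_take]; omega
      have : ¬ (2 * (((List.take (m + 1) t).length : Nat) : Int) > n) := by
        rw [hlen]; exact_mod_cast hc
      rw [if_neg this]
      have : min (m + 1) (n.toNat / 2) = m + 1 := by omega
      rw [this]
      simp

-- the sum over all processed positions is the sum over the first half:
-- for odd length the extra middle position pairs an index with itself and costs 0
theorem pvSum_range'_range (a b : Int) (t : List Char) (N : Nat) (hN : N = t.length) :
    ((List.range' 0 (N - N / 2)).map (pvPair a b t)).sum
      = ((List.range (N / 2)).map (pvPair a b t)).sum := by
  by_cases hpar : N - N / 2 = N / 2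
  · rw [hpar, ← List.range_eq_range']
  · have hodd : N - N / 2 = N / 2 + 1 := by omega
    have hmid : pvPair a b t (N / 2) = 0 := by
      unfold pvPair
      have : t.length - 1 - N / 2 = N / 2 := by omega
      rw [this]
      simp
    rw [hodd, ← List.range_eq_range', List.range_succ, List.map_append, List.sum_append]
    simp [hmid]

-- A's second loop, under Pre_ with 2 ≤ n, is the same sum of per-pair costs over t = s[:n]
theorem pvA_fold_eq_sum (cs : List Char) (n a b : Int) (h2 : 2 ≤ n)
    (hlen : n ≤ (cs.length : Int)) :
    (PySem.List.pyRange 0 (PySem.Int.floordiv n 2) 1).foldl (fun cost i =>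
      if PySem.List.pyGet? cs i != PySem.List.pyGet? cs (n - i - 1) then
        if PySem.List.pyGet? cs i == some 'a' || PySem.List.pyGet? cs (n - i - 1) == some 'a'
        then cost + a else cost + b
      else cost) 0
    = ((List.range ((cs.take n.toNat).length / 2)).map (pvPair a b (cs.take n.toNat))).sum := by
  set t := cs.take n.toNat with ht
  have htlen : t.length = n.toNat := by
    rw [ht, List.length_take]
    omega
  have hcong : ∀ (acc : Int) (k : Nat), k ∈ List.range (n.toNat / 2) →
      (fun cost i =>
        if PySem.List.pyGet? cs i != PySem.List.pyGet? cs (n - i - 1) then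
          if PySem.List.pyGet? cs i == some 'a' || PySem.List.pyGet? cs (n - i - 1) == some 'a'
          then cost + a else cost + b
        else cost) acc ((k : Nat) : Int) = acc + pvPair a b t k := by
    intro acc k hk
    have hk' : k < n.toNat / 2 := List.mem_range.mp hk
    have hkn : k < n.toNat := by omega
    have hg1 : PySem.List.pyGet? cs ((k : Nat) : Int) = t[k]? := by
      rw [PySem.List.pyGet?_natCast, ht, List.getElem?_take_of_lt hkn]
    have hg2 : PySem.List.pyGet? cs (n - ((k : Nat) : Int) - 1) = t[t.length - 1 - k]? := by
      have hcast : n - ((k : Nat) : Int) - 1 = ((n.toNat - 1 - k : Nat) : Int) := by omega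
      have hr : t[t.length - 1 - k]? = cs[n.toNat - 1 - k]? := by
        rw [htlen, ht, List.getElem?_take_of_lt (by omega)]
      rw [hcast, PySem.List.pyGet?_natCast, hr]
    beta_reduce
    rw [hg1, hg2]
    unfold pvPair
    rw [htlen]
    split_ifs <;> ring
  rw [pvFloordiv2 n (by omega), PySem.List.pyRange_zero_natCast, List.foldl_map,
    pvFoldl_congr _ _ (fun acc k => acc + pvPair a b t k) 0 hcong, pvFoldl_add_sum, htlen]
  simp

-- ===== VERDICT (by name: the statement is the Claim_ definition above) =====
theorem palindrome_cost_spec : Claim_equal_palindrome_cost := by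
  intro n a b s _ hpre
  unfold Spec_palindrome_cost palindrome_cost palindrome_cost_alt
  by_cases hn : n < 2
  · rw [if_pos hn]
    have hnil : PySem.List.pyRange 0 (PySem.Int.floordiv n 2) 1 = [] := by
      apply PySem.List.pyRange_one_eq_nil
      simp [PySem.Int.floordiv, Int.fdiv_eq_ediv]
      omega
    rw [hnil]
    simp [pvACheck]
  · rw [if_neg hn]
    have h2 : 2 ≤ n := by omega
    have hlen : n ≤ (s.toList.length : Int) := by
      rcases hpre with h | h
      · exact h
      · omega
    have hslice : PySem.List.slice s.toList none (some n) = s.toList.take n.toNat :=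
      PySem.List.slice_to s.toList (by omega)
    set t := s.toList.take n.toNat with ht
    have htlen : t.length = n.toNat := by
      rw [ht, List.length_take]; omega
    have hpeel : pvPeel n a b t t.reverse 0
        = ((List.range (t.length / 2)).map (pvPair a b t)).sum := by
      have h := pvPeel_eq_sum n a b h2 t t.length (le_refl _) 0
      rw [List.take_length, List.take_of_length_le (by simp)] at h
      rw [h, Nat.sub_self, zero_add]
      have hminN : min t.length (n.toNat / 2) = t.length / 2 := by omega
      rw [hminN]
      exact pvSum_range'_range a b t t.length rfl
    rw [hslice, hpeel, ht, ← pvA_fold_eq_sum s.toList n a b h2 hlen]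
    split_ifs with h
    · exact (pvACheck_fold_id s.toList n a b _ 0 h).symm
    · rfl
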